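-- pv_equiv track=rewrite | github.com/sdraeger/DDALAB | packages/ddalab/ddalab_qt/ui/widgets/plots.py | _resample_indices
-- ===== SOURCE A (Python) =====
-- from typing import Dict, List, Optional, Tuple
--
-- def _resample_indices(source_length: int, target_length: int) -> List[int]:
--     if source_length <= 0 or target_length <= 0:
--         return []
--     if source_length == 1:
--         return [0] * target_length
--     if target_length == 1:
--         return [0]
--     return [
--         min(source_length - 1, (position * (source_length - 1)) // (target_length - 1))
--         for position in range(target_length)
--     ]
-- ===== SOURCE B (Python) =====
-- from typing import List
--
-- def _resample_indices(source_length: int, target_length: int) -> List[int]: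
--     if source_length <= 0 or target_length <= 0:
--         return []
--     if source_length == 1:
--         return [0] * target_length
--     if target_length == 1:
--         return [0]
--     step = source_length - 1
--     den = target_length - 1
--     out = []
--     value = 0
--     rem = 0
--     for _ in range(target_length):
--         out.append(value)
--         rem += step
--         value += rem // den
--         rem %= den
--     return out
-- ===== Notes on version B (the rewrite author's own statement) =====
-- stated objective: faster
-- what changed: Replaces the per-index closed form min(S-1, p*(S-1)//(T-1)) with an incremental DDA/Bresenham loop carrying a running value and remainder (one small-operand division per step, no multiplication and no clamp).
import Mathlib
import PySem

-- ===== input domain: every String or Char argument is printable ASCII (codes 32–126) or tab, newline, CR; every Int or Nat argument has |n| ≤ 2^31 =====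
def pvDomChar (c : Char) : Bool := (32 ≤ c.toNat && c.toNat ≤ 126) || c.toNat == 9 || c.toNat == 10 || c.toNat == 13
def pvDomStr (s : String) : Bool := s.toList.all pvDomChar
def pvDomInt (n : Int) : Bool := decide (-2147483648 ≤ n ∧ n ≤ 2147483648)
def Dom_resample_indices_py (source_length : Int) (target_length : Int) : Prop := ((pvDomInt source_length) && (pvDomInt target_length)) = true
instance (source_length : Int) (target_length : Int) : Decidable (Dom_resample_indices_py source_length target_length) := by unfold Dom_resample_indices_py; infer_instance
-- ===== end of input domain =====

-- B replaces the per-index closed form min(S-1, p*(S-1)//(T-1)) with an incremental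
-- DDA loop carrying a running value and remainder (objective: alternative decomposition).

-- ===== PORT A =====
def resample_indices_py (source_length : Int) (target_length : Int) : List Int :=
  if source_length ≤ 0 ∨ target_length ≤ 0 then []
  else if source_length = 1 then List.replicate target_length.toNat 0
  else if target_length = 1 then [0]
  else (PySem.List.pyRange 0 target_length 1).map
    (fun position => min (source_length - 1)
      (PySem.Int.floordiv (position * (source_length - 1)) (target_length - 1)))

-- ===== PORT B =====
-- the DDA loop of Source B: emit value, then rem += step; value += rem // den; rem %= den
def pvAltLoop (step den : Int) : Nat → Int → Int → List Int
  | 0, _, _ => []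
  | n+1, value, rem =>
      value :: pvAltLoop step den n
        (value + PySem.Int.floordiv (rem + step) den)
        (PySem.Int.mod (rem + step) den)

def resample_indices_py_alt (source_length : Int) (target_length : Int) : List Int :=
  if source_length ≤ 0 ∨ target_length ≤ 0 then []
  else if source_length = 1 then List.replicate target_length.toNat 0
  else if target_length = 1 then [0]
  else pvAltLoop (source_length - 1) (target_length - 1) target_length.toNat 0 0

-- ===== PRECONDITION & SPEC =====
def Spec_resample_indices_py (source_length : Int) (target_length : Int) (out : List Int) : Prop := out = resample_indices_py_alt source_length target_length
instance (source_length : Int) (target_length : Int) (out : List Int) : Decidable (Spec_resample_indices_py source_length target_length out) := by unfold Spec_resample_indices_py; infer_instance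

-- ===== CLAIM (what is proved, stated in full; the proofs are below) =====
def Claim_equal_resample_indices_py : Prop := ∀ (source_length : Int) (target_length : Int), Dom_resample_indices_py source_length target_length → Spec_resample_indices_py source_length target_length (resample_indices_py source_length target_length)

-- ===== LEMMAS AND PROOFS =====

-- loop invariant: started at value = (p*step)/den, rem = (p*step)%den, the loop
-- emits the closed forms for positions p, p+1, …, p+n-1.
lemma pvAltLoop_eq (step den : Int) (hden : 0 < den) :
    ∀ (n : Nat) (p : Int),
      pvAltLoop step den n ((p * step) / den) ((p * step) % den)
        = (List.range n).map (fun (i : Nat) => ((p + (i : Int)) * step) / den) := by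
  intro n
  induction n with
  | zero => intro p; simp [pvAltLoop]
  | succ n ih =>
    intro p
    have hne : den ≠ 0 := ne_of_gt hden
    rw [pvAltLoop, PySem.Int.floordiv_eq_ediv_of_pos hden, PySem.Int.mod_eq_emod_of_pos hden]
    have hsum : (p * step) % den + step + (p * step) / den * den = (p + 1) * step := by
      have := Int.emod_add_mul_ediv (p * step) den
      linarith [this]
    have hval : (p * step) / den + ((p * step) % den + step) / den = ((p + 1) * step) / den := by
      rw [← hsum, Int.add_mul_ediv_right _ _ hne]
      ring
    have hmod : ((p * step) % den + step) % den = ((p + 1) * step) % den := by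
      rw [← hsum]
      simp
    rw [hval, hmod, ih (p + 1)]
    rw [List.range_succ_eq_map, List.map_cons, List.map_map]
    congr 1
    · simp
    · apply List.map_congr_left
      intro i _
      simp only [Function.comp]
      congr 1
      push_cast
      ring

-- inside the last branch the min clamp in A is redundant
lemma pv_min_drop (S T : Int) (hS : 2 ≤ S) (hT : 2 ≤ T) (k : Int) (hk : k < T) :
    min (S - 1) (PySem.Int.floordiv (k * (S - 1)) (T - 1)) = (k * (S - 1)) / (T - 1) := by
  have hden : (0:Int) < T - 1 := by omega
  rw [PySem.Int.floordiv_eq_ediv_of_pos hden]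
  have hle : (k * (S - 1)) / (T - 1) ≤ S - 1 := by
    have h1 : k * (S - 1) ≤ (T - 1) * (S - 1) := by
      apply mul_le_mul_of_nonneg_right (by omega) (by omega)
    calc (k * (S - 1)) / (T - 1) ≤ ((T - 1) * (S - 1)) / (T - 1) :=
          Int.ediv_le_ediv hden h1
      _ = S - 1 := Int.mul_ediv_cancel_left _ (by omega)
  exact min_eq_right hle

-- ===== VERDICT (by name: the statement is the Claim_ definition above) =====
theorem resample_indices_py_spec : Claim_equal_resample_indices_py := by
  intro S T _
  unfold Spec_resample_indices_py resample_indices_py resample_indices_py_alt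
  split_ifs with h1 h2 h3
  · rfl
  · rfl
  · rfl
  · -- main branch: 2 ≤ S, 2 ≤ T
    have hS : 2 ≤ S := by omega
    have hT : 2 ≤ T := by omega
    have hden : (0:Int) < T - 1 := by omega
    have hzero : pvAltLoop (S - 1) (T - 1) T.toNat 0 0
        = pvAltLoop (S - 1) (T - 1) T.toNat (((0:Int) * (S - 1)) / (T - 1)) (((0:Int) * (S - 1)) % (T - 1)) := by
      norm_num
    rw [hzero, pvAltLoop_eq _ _ hden T.toNat 0]
    rw [PySem.List.pyRange_one]
    simp only [sub_zero, zero_add, List.map_map]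
    apply List.map_congr_left
    intro i hi
    have hiT : (i : Int) < T := by
      rw [List.mem_range] at hi
      omega
    simp only [Function.comp]
    simpa using pv_min_drop S T hS hT (i : Int) hiT
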